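-- pv_equiv track=rewrite | github.com/nicky-eng/Escuelita_Gabo_Lato | Ej_6_3.py | espacios_por_separador
-- ===== SOURCE A (Python) =====
-- def espacios_por_separador(cadena, separador, maxi):
--     """Reemplaza todos los espacios dentro de la cadena por el separador."""
--     nueva_cadena = ''
--     contador = 0
--
--     for i in cadena:
--         if i == ' ' and contador < maxi:
--             nueva_cadena = nueva_cadena + separador
--             contador += 1
--         else:
--             nueva_cadena = nueva_cadena + i
--
--     return nueva_cadena
-- ===== SOURCE B (Python) =====
-- def espacios_por_separador(cadena, separador, maxi):
--     # Split on the first max(maxi, 0) single-space characters, then rejoin with the separator.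
--     return separador.join(cadena.split(' ', max(maxi, 0)))
-- ===== Notes on version B (the rewrite author's own statement) =====
-- stated objective: faster
-- what changed: Replaces A's character-by-character scan with a mutable counter and repeated string concatenation by a single split-on-space limited to max(maxi,0) followed by a join with the separator.
import Mathlib
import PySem

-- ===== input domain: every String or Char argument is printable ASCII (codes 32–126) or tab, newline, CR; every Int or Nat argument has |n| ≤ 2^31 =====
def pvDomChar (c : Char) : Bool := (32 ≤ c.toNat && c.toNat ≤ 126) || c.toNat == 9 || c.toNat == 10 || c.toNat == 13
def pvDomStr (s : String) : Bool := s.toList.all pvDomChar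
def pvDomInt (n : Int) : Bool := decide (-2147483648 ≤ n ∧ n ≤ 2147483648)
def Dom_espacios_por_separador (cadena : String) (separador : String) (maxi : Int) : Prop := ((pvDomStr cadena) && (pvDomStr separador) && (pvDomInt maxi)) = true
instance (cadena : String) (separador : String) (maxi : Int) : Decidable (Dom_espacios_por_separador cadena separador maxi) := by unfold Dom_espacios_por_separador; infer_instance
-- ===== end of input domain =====

-- B replaces A's per-character scan with split-on-space (limited to max(maxi,0)) then join: simpler and idiomatic.


-- ===== PORT A =====
-- Literal port of A: scan the characters, keeping the accumulated string (as List Char)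
-- and the counter; replace a space by separador while contador < maxi.
def espacios_por_separador (cadena : String) (separador : String) (maxi : Int) : String :=
  String.ofList
    (cadena.toList.foldl
      (fun (st : List Char × Int) i =>
        if i = ' ' ∧ st.2 < maxi then (st.1 ++ separador.toList, st.2 + 1)
        else (st.1 ++ [i], st.2))
      ([], 0)).1

-- ===== PORT B =====
-- Literal port of B: separador.join(cadena.split(' ', max(maxi, 0))).
-- splitMax? is some because the separator " " is nonempty; .getD [] only discharges the Option.
def espacios_por_separador_alt (cadena : String) (separador : String) (maxi : Int) : String :=
  PySem.Str.join separador ((PySem.Str.splitMax? cadena " " (max maxi 0)).getD [])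

-- ===== PRECONDITION & SPEC =====
def Spec_espacios_por_separador (cadena : String) (separador : String) (maxi : Int) (out : String) : Prop := out = espacios_por_separador_alt cadena separador maxi
instance (cadena : String) (separador : String) (maxi : Int) (out : String) : Decidable (Spec_espacios_por_separador cadena separador maxi out) := by unfold Spec_espacios_por_separador; infer_instance

-- ===== CLAIM (what is proved, stated in full; the proofs are below) =====
def Claim_equal_espacios_por_separador : Prop := ∀ (cadena : String) (separador : String) (maxi : Int), Dom_espacios_por_separador cadena separador maxi → Spec_espacios_por_separador cadena separador maxi (espacios_por_separador cadena separador maxi)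

-- ===== LEMMAS AND PROOFS =====

-- The common reference: replace the first m spaces of l by sep.
def pvRepl (sep : List Char) : List Char → Nat → List Char
  | [], _ => []
  | c :: rest, m => if c = ' ' ∧ m ≠ 0 then sep ++ pvRepl sep rest (m - 1) else c :: pvRepl sep rest m

-- A's fold, from an arbitrary state, appends pvRepl with budget (maxi - k).toNat.
theorem foldA_eq (sep : List Char) (maxi : Int) :
    ∀ (l : List Char) (acc : List Char) (k : Int),
      (l.foldl (fun (st : List Char × Int) i =>
          if i = ' ' ∧ st.2 < maxi then (st.1 ++ sep, st.2 + 1)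
          else (st.1 ++ [i], st.2)) (acc, k)).1
        = acc ++ pvRepl sep l (maxi - k).toNat := by
  intro l
  induction l with
  | nil => intro acc k; simp [pvRepl]
  | cons c rest ih =>
    intro acc k
    by_cases h : c = ' ' ∧ k < maxi
    · have h1 : (maxi - k).toNat ≠ 0 := by omega
      have h2 : (maxi - (k + 1)).toNat = (maxi - k).toNat - 1 := by omega
      have hr : pvRepl sep (c :: rest) (maxi - k).toNat
          = sep ++ pvRepl sep rest ((maxi - k).toNat - 1) := by
        simp [pvRepl, h.1, h1]
      rw [List.foldl_cons, if_pos h, ih, hr, h2, List.append_assoc]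
    · have hr : pvRepl sep (c :: rest) (maxi - k).toNat = c :: pvRepl sep rest (maxi - k).toNat := by
        rcases Decidable.not_and_iff_not_or_not.mp h with hc | hk
        · simp [pvRepl, hc]
        · have : (maxi - k).toNat = 0 := by omega
          simp [pvRepl, this]
      simp only [List.foldl_cons, if_neg h, ih, hr]
      simp [List.append_assoc]

-- The piece list produced by splitOnMax.go, without the reversed accumulator.
def pvPieces : Nat → Nat → List Char → List Char → List (List Char)
  | 0, _, l, cur => [cur.reverse ++ l]
  | _ + 1, _, [], cur => [cur.reverse]
  | fuel + 1, m, c :: rest, cur =>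
    if m = 0 then (cur.reverse ++ (c :: rest)) :: []
    else if [' '].isPrefixOf (c :: rest) then
      cur.reverse :: pvPieces fuel (m - 1) rest []
    else pvPieces fuel m rest (c :: cur)

theorem go_eq_pieces (fuel : Nat) : ∀ (m : Nat) (l cur : List Char) (acc : List (List Char)),
    PySem.Chars.splitOnMax.go [' '] fuel m l cur acc = acc.reverse ++ pvPieces fuel m l cur := by
  induction fuel with
  | zero => intro m l cur acc; simp [PySem.Chars.splitOnMax.go, pvPieces]
  | succ fuel ih =>
    intro m l cur acc
    cases l with
    | nil => simp [PySem.Chars.splitOnMax.go, pvPieces]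
    | cons c rest =>
      by_cases hm : m = 0
      · simp [PySem.Chars.splitOnMax.go, pvPieces, hm]
      · by_cases hp : [' '].isPrefixOf (c :: rest)
        · simp [PySem.Chars.splitOnMax.go, pvPieces, hm, hp, ih]
        · simp [PySem.Chars.splitOnMax.go, pvPieces, hm, hp, ih]

theorem pvPieces_ne_nil (fuel m : Nat) (l cur : List Char) : pvPieces fuel m l cur ≠ [] := by
  induction fuel generalizing m l cur with
  | zero => simp [pvPieces]
  | succ fuel ih =>
    cases l with
    | nil => simp [pvPieces]
    | cons c rest =>
      by_cases hm : m = 0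
      · simp [pvPieces, hm]
      · by_cases hp : [' '].isPrefixOf (c :: rest) <;> simp [pvPieces, hm, hp, ih]

theorem pvIntercalate_cons₂ (s a b : List Char) (bs : List (List Char)) :
    s.intercalate (a :: b :: bs) = a ++ s ++ s.intercalate (b :: bs) := by
  simp [List.intercalate, List.intersperse]

theorem pvRepl_zero (sep : List Char) (l : List Char) : pvRepl sep l 0 = l := by
  induction l with
  | nil => simp [pvRepl]
  | cons c rest ih => simp [pvRepl, ih]

theorem intercalate_pieces (sep : List Char) :
    ∀ (l : List Char) (fuel m : Nat) (cur : List Char), l.length < fuel →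
      sep.intercalate (pvPieces fuel m l cur) = cur.reverse ++ pvRepl sep l m := by
  intro l
  induction l with
  | nil =>
    intro fuel m cur hf
    cases fuel with
    | zero => omega
    | succ fuel => simp [pvPieces, pvRepl, List.intercalate]
  | cons c rest ih =>
    intro fuel m cur hf
    cases fuel with
    | zero => omega
    | succ fuel =>
      have hf' : rest.length < fuel := by simpa using Nat.lt_of_succ_lt_succ hf
      by_cases hm : m = 0
      · simp [pvPieces, hm, List.intercalate, pvRepl_zero]
      · by_cases hc : c = ' '
        · have hp : [' '].isPrefixOf (c :: rest) = true := by simp [List.isPrefixOf, hc]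
          have hne := pvPieces_ne_nil fuel (m - 1) rest []
          rw [show pvPieces (fuel + 1) m (c :: rest) cur
                = cur.reverse :: pvPieces fuel (m - 1) rest [] by simp [pvPieces, hm, hp]]
          rcases List.exists_cons_of_ne_nil hne with ⟨p, ps, hps⟩
          rw [hps, pvIntercalate_cons₂, ← hps, ih fuel (m - 1) [] hf']
          simp [pvRepl, hc, hm, List.append_assoc]
        · have hp : [' '].isPrefixOf (c :: rest) = false := by
            simp only [List.isPrefixOf, Bool.and_true,
              beq_eq_false_iff_ne, ne_eq]
            exact fun h => hc h.symm
          rw [show pvPieces (fuel + 1) m (c :: rest) cur = pvPieces fuel m rest (c :: cur) by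
                simp [pvPieces, hm, hp]]
          rw [ih fuel m (c :: cur) hf']
          simp [pvRepl, hc, List.append_assoc]

theorem both_eq (cadena separador : String) (maxi : Int) :
    espacios_por_separador cadena separador maxi = espacios_por_separador_alt cadena separador maxi := by
  unfold espacios_por_separador espacios_por_separador_alt
  have hB : (PySem.Str.splitMax? cadena " " (max maxi 0)).getD []
      = (PySem.Chars.splitOnMax cadena.toList [' '] (max maxi 0)).map String.ofList := by
    simp [PySem.Str.splitMax?, PySem.Chars.splitMax?]
  rw [hB]
  have hnn : ¬ (max maxi 0 < 0) := by omega
  rw [PySem.Str.join, PySem.Chars.join, PySem.Chars.splitOnMax, if_neg hnn]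
  rw [go_eq_pieces]
  have hlen : (cadena.toList).length < cadena.toList.length + 1 := Nat.lt_succ_self _
  have hmax : (max maxi 0).toNat = (maxi - 0).toNat := by omega
  rw [List.map_map]
  have hcomp : (String.toList ∘ String.ofList) = id := by
    funext x; simp
  rw [hcomp, List.map_id, List.reverse_nil, List.nil_append,
      intercalate_pieces separador.toList cadena.toList _ _ _ hlen,
      foldA_eq separador.toList maxi cadena.toList [] 0]
  rw [hmax]
  simp

-- ===== VERDICT (by name: the statement is the Claim_ definition above) =====
theorem espacios_por_separador_spec : Claim_equal_espacios_por_separador := by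
  intro cadena separador maxi _
  unfold Spec_espacios_por_separador
  exact both_eq cadena separador maxi
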